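-- pv_equiv track=rewrite | github.com/vilhelmhilding/resolvent | backend/core/color_registry.py | assign_colors
-- ===== SOURCE A (Python) =====
-- PALETTE = [
--     "#E63946", "#1D4ED8", "#06A77D", "#F77F00", "#7209B7",
--     "#0EA5E9", "#D62828", "#059669", "#8338EC", "#B45309",
-- ]
--
-- HUE_FAMILY = {
--     "#E63946": "red",   "#D62828": "red",
--     "#1D4ED8": "blue",  "#0EA5E9": "blue",
--     "#06A77D": "green", "#059669": "green",
--     "#F77F00": "orange","#B45309": "orange",
--     "#7209B7": "purple","#8338EC": "purple",
-- }
--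
-- def assign_colors(parts: list) -> list:
--     assigned: list[str] = []
--     for i in range(len(parts)):
--         prev_family = HUE_FAMILY.get(assigned[i - 1]) if i > 0 else None
--         used = set(assigned)
--         for color in PALETTE:
--             if color in used:
--                 continue
--             if HUE_FAMILY.get(color) == prev_family:
--                 continue
--             assigned.append(color)
--             break
--         else:
--             for color in PALETTE:
--                 if color not in used:
--                     assigned.append(color)
--                     break
--             else:
--                 assigned.append(PALETTE[i % len(PALETTE)])
--     for part, color in zip(parts, assigned):
--         part["color"] = color
--     return parts
-- ===== SOURCE B (Python) =====
-- PALETTE = [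
--     "#E63946", "#1D4ED8", "#06A77D", "#F77F00", "#7209B7",
--     "#0EA5E9", "#D62828", "#059669", "#8338EC", "#B45309",
-- ]
--
-- def assign_colors(parts: list) -> list:
--     # The palette order already alternates hue families, so the "first unused
--     # color of a different family" search always lands on PALETTE[i], and after
--     # exhaustion A's fallback is PALETTE[i % 10] too: the assignment is periodic.
--     for i, part in enumerate(parts):
--         part["color"] = PALETTE[i % len(PALETTE)]
--     return parts
-- ===== Notes on version B (the rewrite author's own statement) =====
-- stated objective: simpler
-- what changed: B replaces A's per-element used-set rebuild and two-pass palette search with the closed-form periodic assignment PALETTE[i % 10], which the search provably always yields because the palette order already alternates hue families.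
import Mathlib
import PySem

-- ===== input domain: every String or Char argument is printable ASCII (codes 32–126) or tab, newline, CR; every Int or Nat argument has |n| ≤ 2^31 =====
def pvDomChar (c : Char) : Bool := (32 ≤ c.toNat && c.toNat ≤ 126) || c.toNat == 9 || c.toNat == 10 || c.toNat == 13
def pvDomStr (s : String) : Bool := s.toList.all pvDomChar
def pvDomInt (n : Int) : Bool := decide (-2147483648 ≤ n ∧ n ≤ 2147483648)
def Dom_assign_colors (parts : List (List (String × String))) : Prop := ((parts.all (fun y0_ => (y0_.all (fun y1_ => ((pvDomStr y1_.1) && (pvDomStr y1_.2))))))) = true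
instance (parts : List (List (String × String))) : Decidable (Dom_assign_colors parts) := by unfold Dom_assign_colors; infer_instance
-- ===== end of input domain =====

-- B replaces A's per-element palette search with the closed-form periodic color PALETTE[i % 10].
-- Both the Python A and the Python B mutate the part dicts in place; the theorems are about the return value.

def pvPALETTE : List String :=
  ["#E63946", "#1D4ED8", "#06A77D", "#F77F00", "#7209B7",
   "#0EA5E9", "#D62828", "#059669", "#8338EC", "#B45309"]

def pvHUE_FAMILY : PySem.Dict String String := PySem.Dict.ofList
  [("#E63946", "red"),   ("#D62828", "red"),
   ("#1D4ED8", "blue"),  ("#0EA5E9", "blue"),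
   ("#06A77D", "green"), ("#059669", "green"),
   ("#F77F00", "orange"),("#B45309", "orange"),
   ("#7209B7", "purple"),("#8338EC", "purple")]

-- ===== PORT A =====
-- one iteration of A's outer loop (body of 'for i in range(len(parts))'); the for/break
-- searches over PALETTE are List.find?.  assigned[i-1] cannot raise (i > 0 and len(assigned) = i),
-- so the Option.bind through pyGet? is exact.
def pvChooseA (assigned : List String) (i : Nat) : List String :=
  let prev_family : Option String :=
    if i > 0 then (PySem.List.pyGet? assigned ((i : Int) - 1)).bind (fun c => pvHUE_FAMILY.get? c)
    else none
  let used : PySem.Set String := PySem.Set.ofList assigned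
  match pvPALETTE.find? (fun c => !(PySem.Set.contains used c) && !(pvHUE_FAMILY.get? c == prev_family)) with
  | some c => assigned ++ [c]
  | none =>
    match pvPALETTE.find? (fun c => !(PySem.Set.contains used c)) with
    | some c => assigned ++ [c]
    | none => assigned ++ [(PySem.List.pyGet? pvPALETTE (PySem.Int.mod (i : Int) 10)).getD ""]

def assign_colors (parts : List (List (String × String))) : List (List (String × String)) :=
  let assigned : List String := (List.range parts.length).foldl pvChooseA []
  -- 'for part, color in zip(parts, assigned): part["color"] = color; return parts'
  -- (len(assigned) = len(parts), so every part is mutated)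
  (parts.zip assigned).map (fun pc => (PySem.Dict.insert (PySem.Dict.mk pc.1) "color" pc.2).items)

-- ===== PORT B =====
def assign_colors_alt (parts : List (List (String × String))) : List (List (String × String)) :=
  (PySem.List.enumerate parts).map (fun ip =>
    (PySem.Dict.insert (PySem.Dict.mk ip.2) "color"
      ((PySem.List.pyGet? pvPALETTE (PySem.Int.mod ip.1 (pvPALETTE.length : Int))).getD "")).items)

-- ===== PRECONDITION & SPEC =====
def Spec_assign_colors (parts : List (List (String × String))) (out : List (List (String × String))) : Prop := out = assign_colors_alt parts
instance (parts : List (List (String × String))) (out : List (List (String × String))) : Decidable (Spec_assign_colors parts out) := by unfold Spec_assign_colors; infer_instance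

-- ===== CLAIM (what is proved, stated in full; the proofs are below) =====
def Claim_equal_assign_colors : Prop := ∀ (parts : List (List (String × String))), Dom_assign_colors parts → Spec_assign_colors parts (assign_colors parts)

-- ===== LEMMAS AND PROOFS =====

-- the periodic color
def pvG (j : Nat) : String := pvPALETTE.getD (j % 10) ""

theorem pvIdxColor' (k : Nat) :
    (PySem.List.pyGet? pvPALETTE ((k : Int) % 10)).getD "" = pvG k := by
  have h : ((k : Int) % 10) = ((k % 10 : Nat) : Int) := by omega
  rw [h, PySem.List.pyGet?_natCast, pvG, List.getD_eq_getElem?_getD]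

theorem pvIdxColor (k : Nat) :
    (PySem.List.pyGet? pvPALETTE (PySem.Int.mod (k : Int) 10)).getD "" = pvG k := by
  rw [PySem.Int.mod_eq_emod_of_pos (by omega), pvIdxColor']

theorem pvPaletteMem (i : Nat) (hi : 10 ≤ i) :
    ∀ c ∈ pvPALETTE, c ∈ (List.range i).map pvG := by
  intro c hc
  have h10 : c ∈ (List.range 10).map pvG := by fin_cases hc <;> decide
  obtain ⟨j, hj, hg⟩ := List.mem_map.mp h10
  exact List.mem_map.mpr ⟨j, List.mem_range.mpr (by have := List.mem_range.mp hj; omega), hg⟩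

theorem pvChooseA_step (i : Nat) :
    pvChooseA ((List.range i).map pvG) i = (List.range (i + 1)).map pvG := by
  rw [List.range_succ, List.map_append, List.map_singleton]
  by_cases hi : i < 10
  · interval_cases i <;> decide
  · have hall : ∀ c ∈ pvPALETTE,
        PySem.Set.contains (PySem.Set.ofList ((List.range i).map pvG)) c = true := by
      intro c hc
      have hm : c ∈ PySem.Set.ofList ((List.range i).map pvG) :=
        (PySem.Set.mem_ofList (y := c) (xs := (List.range i).map pvG)).mpr
          (pvPaletteMem i (by omega) c hc)
      simpa using hm
    have h1 : pvPALETTE.find? (fun c =>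
        !(PySem.Set.contains (PySem.Set.ofList ((List.range i).map pvG)) c) &&
        !(pvHUE_FAMILY.get? c == (if i > 0
            then (PySem.List.pyGet? ((List.range i).map pvG) ((i : Int) - 1)).bind (fun c => pvHUE_FAMILY.get? c)
            else none))) = none := by
      apply List.find?_eq_none.mpr
      intro c hc
      simp only [hall c hc, Bool.not_true, Bool.false_and]
      decide
    have h2 : pvPALETTE.find? (fun c =>
        !(PySem.Set.contains (PySem.Set.ofList ((List.range i).map pvG)) c)) = none := by
      apply List.find?_eq_none.mpr
      intro c hc
      simp only [hall c hc, Bool.not_true]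
      decide
    simp only [pvChooseA, h1, h2, pvIdxColor]

theorem pvAssignedEq (n : Nat) :
    (List.range n).foldl pvChooseA [] = (List.range n).map pvG := by
  induction n with
  | zero => rfl
  | succ n ih =>
    rw [List.range_succ, List.foldl_append, List.map_append, ih, List.foldl_cons, List.foldl_nil,
      ← List.map_append, ← List.range_succ, pvChooseA_step]

-- ===== VERDICT (by name: the statement is the Claim_ definition above) =====
theorem assign_colors_spec : Claim_equal_assign_colors := by
  intro parts _
  show assign_colors parts = assign_colors_alt parts
  unfold assign_colors assign_colors_alt
  rw [pvAssignedEq]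
  apply List.ext_getElem
  · simp [PySem.List.length_enumerate]
  · intro k h1 h2
    have hk : k < parts.length := by simpa [PySem.List.length_enumerate] using h2
    simp [List.getElem_zip, PySem.List.getElem_enumerate, pvIdxColor',
      show pvPALETTE.length = 10 from rfl]
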